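-- pv_equiv track=rewrite | github.com/ryaneijae/advent | 2022/day14_RegolithReservoir/part1.py | get_scan_min_max
-- ===== SOURCE A (Python) =====
-- def get_scan_min_max(cave_scan):
--     x_min = 500
--     x_max = 500
--     y_max = 0
--
--     for scan in cave_scan:
--         for point in scan:
--             x, y = point
--             if y > y_max: y_max = y
--             if x > x_max: x_max = x
--             if x < x_min: x_min = x
--
--     return x_min, x_max, y_max
-- ===== SOURCE B (Python) =====
-- def get_scan_min_max(cave_scan):
--     xs = sorted([500] + [p[0] for scan in cave_scan for p in scan])
--     ys = sorted([0] + [p[1] for scan in cave_scan for p in scan])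
--     return xs[0], xs[-1], ys[-1]
-- ===== Notes on version B (the rewrite author's own statement) =====
-- stated objective: alternative
-- what changed: Instead of A's single nested comparison loop carrying three running extrema, B sorts the seeded flattened x- and y-coordinate lists and reads the extrema off the endpoints (first/last element) of the sorted lists.
import Mathlib
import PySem

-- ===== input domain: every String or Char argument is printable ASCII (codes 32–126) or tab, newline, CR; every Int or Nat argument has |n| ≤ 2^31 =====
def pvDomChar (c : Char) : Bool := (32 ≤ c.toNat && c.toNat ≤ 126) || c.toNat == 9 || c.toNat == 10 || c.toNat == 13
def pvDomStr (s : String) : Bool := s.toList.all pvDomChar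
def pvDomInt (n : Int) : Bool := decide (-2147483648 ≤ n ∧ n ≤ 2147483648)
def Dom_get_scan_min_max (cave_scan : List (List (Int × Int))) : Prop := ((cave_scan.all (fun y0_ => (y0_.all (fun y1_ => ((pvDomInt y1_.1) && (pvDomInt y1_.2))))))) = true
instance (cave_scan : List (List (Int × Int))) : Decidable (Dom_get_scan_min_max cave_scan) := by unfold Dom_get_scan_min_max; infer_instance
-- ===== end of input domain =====

-- B sorts the seeded flattened coordinate lists and reads the extrema from their endpoints, instead of A's comparison loop (objective: alternative, not faster).
-- ===== PORT A =====
def pvStep (st : Int × Int × Int) (point : Int × Int) : Int × Int × Int :=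
  let x := point.1
  let y := point.2
  let y_max := if y > st.2.2 then y else st.2.2
  let x_max := if x > st.2.1 then x else st.2.1
  let x_min := if x < st.1 then x else st.1
  (x_min, x_max, y_max)

def get_scan_min_max (cave_scan : List (List (Int × Int))) : Int × Int × Int :=
  cave_scan.foldl (fun st scan => scan.foldl pvStep st) (500, 500, 0)

-- ===== PORT B =====
-- xs[0] / xs[-1] on the always-nonempty (seeded) sorted lists are ported as headD / getLastD; the defaults are never reached.
def get_scan_min_max_alt (cave_scan : List (List (Int × Int))) : Int × Int × Int :=
  let xs := PySem.List.sorted (500 :: cave_scan.flatMap (fun scan => scan.map Prod.fst)) (fun x => x) false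
  let ys := PySem.List.sorted (0 :: cave_scan.flatMap (fun scan => scan.map Prod.snd)) (fun x => x) false
  (xs.headD 0, xs.getLastD 0, ys.getLastD 0)

-- ===== PRECONDITION & SPEC =====
def Spec_get_scan_min_max (cave_scan : List (List (Int × Int))) (out : Int × Int × Int) : Prop := out = get_scan_min_max_alt cave_scan
instance (cave_scan : List (List (Int × Int))) (out : Int × Int × Int) : Decidable (Spec_get_scan_min_max cave_scan out) := by unfold Spec_get_scan_min_max; infer_instance

-- ===== CLAIM =====
def Claim_equal_get_scan_min_max : Prop := ∀ (cave_scan : List (List (Int × Int))), Dom_get_scan_min_max cave_scan → Spec_get_scan_min_max cave_scan (get_scan_min_max cave_scan)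

-- ===== LEMMAS AND PROOFS =====
lemma pvStep_eq (st : Int × Int × Int) (p : Int × Int) :
    pvStep st p = (min st.1 p.1, max st.2.1 p.1, max st.2.2 p.2) := by
  unfold pvStep
  obtain ⟨a, b, c⟩ := st
  obtain ⟨x, y⟩ := p
  simp only [min_def, max_def]
  split_ifs <;> simp_all <;> omega

lemma fold_pvStep (l : List (Int × Int)) (a b c : Int) :
    l.foldl pvStep (a, b, c) =
      ((l.map Prod.fst).foldl min a, (l.map Prod.fst).foldl max b, (l.map Prod.snd).foldl max c) := by
  induction l generalizing a b c with
  | nil => rfl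
  | cons p t ih => simp only [List.foldl_cons, List.map_cons, pvStep_eq]; exact ih _ _ _

lemma fold_nested (L : List (List (Int × Int))) (st : Int × Int × Int) :
    L.foldl (fun st scan => scan.foldl pvStep st) st = (L.flatMap id).foldl pvStep st := by
  induction L generalizing st with
  | nil => rfl
  | cons s t ih => simp only [List.foldl_cons, List.flatMap_cons, List.foldl_append, id]; exact ih _

lemma foldl_min_mem (l : List Int) (a : Int) : l.foldl min a ∈ a :: l := by
  induction l generalizing a with
  | nil => simp
  | cons x t ih =>
    simp only [List.foldl_cons]
    rcases List.mem_cons.mp (ih (min a x)) with h | h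
    · rw [h]; rcases min_choice a x with hm | hm <;> simp [hm]
    · simp [h]

lemma foldl_min_le (l : List Int) (a : Int) : ∀ y ∈ a :: l, l.foldl min a ≤ y := by
  induction l generalizing a with
  | nil => simp
  | cons x t ih =>
    intro y hy
    simp only [List.mem_cons] at hy
    simp only [List.foldl_cons]
    rcases hy with h | h | h
    · exact le_trans (ih (min a x) (min a x) (by simp)) (by simp [h])
    · exact le_trans (ih (min a x) (min a x) (by simp)) (by simp [h])
    · exact ih (min a x) y (by simp [h])

lemma foldl_max_mem (l : List Int) (a : Int) : l.foldl max a ∈ a :: l := by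
  induction l generalizing a with
  | nil => simp
  | cons x t ih =>
    simp only [List.foldl_cons]
    rcases List.mem_cons.mp (ih (max a x)) with h | h
    · rw [h]; rcases max_choice a x with hm | hm <;> simp [hm]
    · simp [h]

lemma foldl_max_ge (l : List Int) (a : Int) : ∀ y ∈ a :: l, y ≤ l.foldl max a := by
  induction l generalizing a with
  | nil => simp
  | cons x t ih =>
    intro y hy
    simp only [List.mem_cons] at hy
    simp only [List.foldl_cons]
    rcases hy with h | h | h
    · exact le_trans (by simp [h]) (ih (max a x) (max a x) (by simp))
    · exact le_trans (by simp [h]) (ih (max a x) (max a x) (by simp))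
    · exact ih (max a x) y (by simp [h])

lemma getLast_pairwise_ge (s : List Int) (h : s ≠ []) (hp : s.Pairwise (· ≤ ·)) :
    ∀ y ∈ s, y ≤ s.getLast h := by
  induction s with
  | nil => simp at h
  | cons x t ih =>
    intro y hy
    rcases List.pairwise_cons.mp hp with ⟨hx, ht⟩
    by_cases hte : t = []
    · subst hte; simp at hy; simp [hy, List.getLast]
    · rw [List.getLast_cons hte]
      simp only [List.mem_cons] at hy
      rcases hy with h1 | h1
      · exact h1 ▸ hx _ (List.getLast_mem hte)
      · exact ih hte ht y h1

lemma sorted_headD_eq_foldl_min (a : Int) (l : List Int) :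
    (PySem.List.sorted (a :: l) (fun x => x) false).headD 0 = l.foldl min a := by
  have hne : PySem.List.sorted (a :: l) (fun x => x) false ≠ [] := by
    intro h; exact List.cons_ne_nil a l ((PySem.List.sorted_eq_nil_iff _ _ _).mp h)
  obtain ⟨m, t, hs⟩ := List.exists_cons_of_ne_nil hne
  have hhead := PySem.List.key_head_sorted_le (xs := a :: l) (key := fun x => x) hs
  have hperm := PySem.List.sorted_perm (a :: l) (fun x => x) false
  have hm_mem : m ∈ a :: l := hperm.mem_iff.mp (by rw [hs]; simp)
  have h1 : m ≤ l.foldl min a := hhead _ (foldl_min_mem l a)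
  have h2 : l.foldl min a ≤ m := foldl_min_le l a m hm_mem
  rw [hs]; simpa using le_antisymm h1 h2

lemma sorted_getLastD_eq_foldl_max (a : Int) (l : List Int) :
    (PySem.List.sorted (a :: l) (fun x => x) false).getLastD 0 = l.foldl max a := by
  have hne : PySem.List.sorted (a :: l) (fun x => x) false ≠ [] := by
    intro h; exact List.cons_ne_nil a l ((PySem.List.sorted_eq_nil_iff _ _ _).mp h)
  have hp : (PySem.List.sorted (a :: l) (fun x => x) false).Pairwise (· ≤ ·) := by
    simpa using PySem.List.sorted_pairwise (xs := a :: l) (key := fun x => x)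
  have hperm := PySem.List.sorted_perm (a :: l) (fun x => x) false
  have hlast_mem : (PySem.List.sorted (a :: l) (fun x => x) false).getLast hne ∈ a :: l :=
    hperm.mem_iff.mp (List.getLast_mem hne)
  have hm_mem : l.foldl max a ∈ PySem.List.sorted (a :: l) (fun x => x) false :=
    hperm.mem_iff.mpr (foldl_max_mem l a)
  have h1 : (PySem.List.sorted (a :: l) (fun x => x) false).getLast hne ≤ l.foldl max a :=
    foldl_max_ge l a _ hlast_mem
  have h2 : l.foldl max a ≤ (PySem.List.sorted (a :: l) (fun x => x) false).getLast hne :=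
    getLast_pairwise_ge _ hne hp _ hm_mem
  rw [List.getLastD_eq_getLast?, List.getLast?_eq_some_getLast hne]
  simpa using le_antisymm h1 h2

-- ===== VERDICT =====
theorem get_scan_min_max_spec : Claim_equal_get_scan_min_max := by
  intro cave_scan _
  unfold Spec_get_scan_min_max get_scan_min_max get_scan_min_max_alt
  rw [fold_nested, fold_pvStep]
  simp only [sorted_headD_eq_foldl_min, sorted_getLastD_eq_foldl_max]
  simp [List.flatMap_def]
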